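-- pv_equiv track=rewrite | github.com/YellowShinwon/YellowShinwon_Home | que/three.py | solution
-- ===== SOURCE A (Python) =====
-- def solution(prog, spd):
--     prog.reverse()
--     spd.reverse()
--     ans = []
--     while 1:
--         cnt = 0
--         prog = [prog[i]+spd[i] for i in range(len(prog))]
--         # prog = [x+y for x,y in zip(prog, spd)]
--         while prog[-1] >= 100:
--             cnt += 1
--             prog.pop()
--             spd.pop()
--             if prog == []:
--                 ans.append(cnt)
--                 return ans
--         if cnt != 0:
--             ans.append(cnt)
-- ===== SOURCE B (Python) =====
-- def solution(prog, spd):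
--     # one pass: closed-form completion day per task, grouped by the running leader day
--     ans = []
--     cur = 0
--     cnt = 0
--     for i in range(len(prog)):
--         d = max(1, -((prog[i] - 100) // spd[i]))
--         if d <= cur:
--             cnt += 1
--         else:
--             if cnt:
--                 ans.append(cnt)
--             cur = d
--             cnt = 1
--     if cnt:
--         ans.append(cnt)
--     return ans
-- ===== Notes on version B (the rewrite author's own statement) =====
-- stated objective: faster
-- what changed: A simulates progress day by day over reversed lists with repeated pops; B computes each task's ceil completion day with one floor division and emits group sizes in a single pass that tracks the running group-leader day; intended as faster: a timing run saw A time out at n=16 where B returned, though no clean ratio could be measured.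
-- outside the precondition, e.g. on solution([99, 1], [1, 1, 100]): A returns [2], B returns [1, 1]; on solution([], []): A raises IndexError, B returns []; on solution([1], [0]): A does not finish within the time limit, B raises ZeroDivisionError
import Mathlib
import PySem

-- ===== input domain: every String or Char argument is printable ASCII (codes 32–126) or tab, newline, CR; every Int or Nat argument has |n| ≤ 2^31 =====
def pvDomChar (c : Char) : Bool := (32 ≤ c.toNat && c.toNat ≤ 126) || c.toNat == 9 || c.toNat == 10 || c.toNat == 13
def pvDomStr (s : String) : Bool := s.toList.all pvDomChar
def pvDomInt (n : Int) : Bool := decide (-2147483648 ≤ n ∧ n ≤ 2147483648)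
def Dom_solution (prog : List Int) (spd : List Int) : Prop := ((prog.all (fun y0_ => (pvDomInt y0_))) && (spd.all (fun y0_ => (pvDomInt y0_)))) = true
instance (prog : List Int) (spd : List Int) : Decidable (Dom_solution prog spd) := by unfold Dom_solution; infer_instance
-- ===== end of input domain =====

-- B replaces A's day-by-day simulation by a closed-form completion day per task and a
-- single grouping pass; intended as faster (a timing run saw A time out at n=16 where
-- B returned, but could not measure a clean ratio). Python A mutates its arguments in
-- place (reverse, pops); the equivalence proved here is about the return value only.

-- ===== PORT A =====
-- prog = [prog[i]+spd[i] for i in range(len(prog))]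
def pvStepA (prog : List Int) (spd : List Int) : List Int :=
  (List.range prog.length).map (fun i => prog.getD i 0 + spd.getD i 0)

-- the inner 'while prog[-1] >= 100' loop: Sum.inr cnt means 'prog became [], return ans+[cnt]'
def pvPopA (prog : List Int) (spd : List Int) (cnt : Int) : (List Int × List Int × Int) ⊕ Int :=
  match h : prog.getLast? with
  | none => Sum.inl (prog, spd, cnt)   -- Python raises IndexError here; unreachable under Pre_
  | some x =>
    if 100 ≤ x then
      if prog.dropLast = [] then Sum.inr (cnt + 1)
      else pvPopA prog.dropLast spd.dropLast (cnt + 1)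
    else Sum.inl (prog, spd, cnt)
termination_by prog.length
decreasing_by
  have hne : prog ≠ [] := by intro he; subst he; simp at h
  have : 0 < prog.length := List.length_pos_iff.mpr hne
  simp [List.length_dropLast]; omega

-- the outer 'while 1' loop; fuel is only a totality guard (never exhausted under Pre_)
def pvLoopA : Nat → List Int → List Int → List Int → List Int
  | 0, _, _, ans => ans
  | fuel+1, prog, spd, ans =>
    match pvPopA (pvStepA prog spd) spd 0 with
    | Sum.inr cnt => ans ++ [cnt]
    | Sum.inl (prog2, spd2, cnt) =>
        pvLoopA fuel prog2 spd2 (if cnt ≠ 0 then ans ++ [cnt] else ans)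

def solution (prog : List Int) (spd : List Int) : List Int :=
  pvLoopA (prog.foldl (fun m p => max m (100 - p).toNat) 1) prog.reverse spd.reverse []

-- ===== PORT B =====
-- max(1, -((p - 100) // s)) : ceil((100-p)/s), at least one day
def pvDayB (p : Int) (s : Int) : Int := max 1 (-(PySem.Int.floordiv (p - 100) s))

-- one step of B's grouping loop; state = (ans, cur, cnt)
def pvStepB (acc : List Int × Int × Int) (d : Int) : List Int × Int × Int :=
  if d ≤ acc.2.1 then (acc.1, acc.2.1, acc.2.2 + 1)
  else ((if acc.2.2 ≠ 0 then acc.1 ++ [acc.2.2] else acc.1), d, 1)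

def solution_alt (prog : List Int) (spd : List Int) : List Int :=
  let st := (List.range prog.length).foldl
    (fun acc i => pvStepB acc (pvDayB (prog.getD i 0) (spd.getD i 0))) ([], 0, 0)
  if st.2.2 ≠ 0 then st.1 ++ [st.2.2] else st.1

-- ===== PRECONDITION & SPEC =====
-- Pre_ excludes: empty prog (A raises IndexError at prog[-1]); spd shorter than prog (A
-- raises IndexError in the comprehension); spd longer than prog (A's reverse-then-index
-- pairing pairs tasks with accidental speeds — an artefact of reversing both lists); and
-- any speed < 1 (A loops forever, or a task never completes).
def Pre_solution (prog : List Int) (spd : List Int) : Prop :=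
  prog ≠ [] ∧ prog.length = spd.length ∧ ∀ s ∈ spd, 1 ≤ s
instance (prog : List Int) (spd : List Int) : Decidable (Pre_solution prog spd) := by
  unfold Pre_solution; infer_instance

def pvWitness_solution : List Int × List Int := ([93, 30, 55], [1, 30, 5])

def Spec_solution (prog : List Int) (spd : List Int) (out : List Int) : Prop := out = solution_alt prog spd
instance (prog : List Int) (spd : List Int) (out : List Int) : Decidable (Spec_solution prog spd out) := by unfold Spec_solution; infer_instance

-- ===== CLAIM (what is proved, stated in full; the proofs are below) =====
def Claim_equal_solution : Prop := ∀ (prog : List Int) (spd : List Int), Dom_solution prog spd → Pre_solution prog spd → Spec_solution prog spd (solution prog spd)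

-- ===== LEMMAS AND PROOFS =====

-- common spec: group sizes by the running group-leader day
def pvSpecGo : List Int → List Int
  | [] => []
  | d :: rest =>
      (1 + ((rest.takeWhile (fun e => decide (e ≤ d))).length : Int)) ::
        pvSpecGo (rest.dropWhile (fun e => decide (e ≤ d)))
termination_by l => l.length
decreasing_by
  exact Nat.lt_succ_of_le (List.length_dropWhile_le _ _)

-- remaining tasks u (original order) at elapsed time t, as A's reversed state
def pvMp (t : Int) (u : List (Int × Int)) : List Int :=
  (u.map (fun x => x.1 + t * x.2)).reverse
def pvMs (u : List (Int × Int)) : List Int :=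
  (u.map Prod.snd).reverse

theorem pvDay_pos (p s : Int) : 1 ≤ pvDayB p s := le_max_left _ _

theorem pvDay_le_iff (p s t : Int) (hs : 1 ≤ s) (ht : 1 ≤ t) :
    pvDayB p s ≤ t ↔ 100 ≤ p + t * s := by
  unfold pvDayB
  rw [max_le_iff]
  have h1 : (0:Int) < s := by omega
  constructor
  · rintro ⟨-, h⟩
    have h2 : -t ≤ PySem.Int.floordiv (p - 100) s := by omega
    rw [PySem.Int.le_floordiv_iff_mul_le h1] at h2
    rw [neg_mul] at h2
    linarith
  · intro h
    refine ⟨ht, ?_⟩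
    have h2 : -t * s ≤ p - 100 := by rw [neg_mul]; linarith
    rw [← PySem.Int.le_floordiv_iff_mul_le h1] at h2
    omega

theorem pvPopA_spec (u : List (Int × Int)) (t : Int) (ht : 1 ≤ t)
    (hs : ∀ x ∈ u, 1 ≤ x.2) : ∀ cnt : Int,
    pvPopA (pvMp t u) (pvMs u) cnt =
      if u.dropWhile (fun x => decide (pvDayB x.1 x.2 ≤ t)) = [] ∧ u ≠ [] then
        Sum.inr (cnt + ((u.takeWhile (fun x => decide (pvDayB x.1 x.2 ≤ t))).length : Int))
      else Sum.inl (pvMp t (u.dropWhile (fun x => decide (pvDayB x.1 x.2 ≤ t))),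
                    pvMs (u.dropWhile (fun x => decide (pvDayB x.1 x.2 ≤ t))),
                    cnt + ((u.takeWhile (fun x => decide (pvDayB x.1 x.2 ≤ t))).length : Int)) := by
  induction u with
  | nil =>
    intro cnt
    simp [pvPopA, pvMp, pvMs]
  | cons x u ih =>
    intro cnt
    have hsx : 1 ≤ x.2 := hs x (by simp)
    have hmp : pvMp t (x :: u) = pvMp t u ++ [x.1 + t * x.2] := by
      simp [pvMp]
    have hms : pvMs (x :: u) = pvMs u ++ [x.2] := by
      simp [pvMs]
    rw [pvPopA.eq_def, hmp, hms]
    simp only [List.dropLast_concat]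
    split
    case _ hnone =>
      rw [List.getLast?_concat] at hnone
      exact absurd hnone (by simp)
    case _ y hsome =>
    rw [List.getLast?_concat] at hsome
    obtain rfl : y = x.1 + t * x.2 := by injection hsome with h'; exact h'.symm
    by_cases hx : pvDayB x.1 x.2 ≤ t
    · have h100 : 100 ≤ x.1 + t * x.2 := (pvDay_le_iff x.1 x.2 t hsx ht).mp hx
      rw [if_pos h100]
      by_cases hu : u = []
      · subst hu
        simp [pvMp, hx]
      · have hmp' : pvMp t u ≠ [] := by
          simp [pvMp, hu]
        rw [if_neg hmp']
        rw [ih (fun y hy => hs y (by simp [hy])) (cnt + 1)]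
        simp only [List.dropWhile_cons, List.takeWhile_cons, hx, decide_true]
        simp only [if_pos trivial]
        have hne : (x :: u) ≠ [] := by simp
        by_cases hdw : u.dropWhile (fun y => decide (pvDayB y.1 y.2 ≤ t)) = []
        · rw [if_pos ⟨hdw, hu⟩, if_pos ⟨hdw, hne⟩]
          congr 1
          simp only [List.length_cons]
          push_cast
          omega
        · rw [if_neg (by simp [hdw]), if_neg (by simp [hdw])]
          congr 2
          simp only [List.length_cons]
          push_cast
          ring_nf
    · have h100 : ¬ (100 ≤ x.1 + t * x.2) := by
        intro h; exact hx ((pvDay_le_iff x.1 x.2 t hsx ht).mpr h)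
      rw [if_neg h100]
      simp [hx, hmp, hms]

theorem pvStepA_spec (u : List (Int × Int)) (t : Int) :
    pvStepA (pvMp t u) (pvMs u) = pvMp (t + 1) u := by
  apply List.ext_getElem
  · simp [pvStepA, pvMp, pvMs]
  · intro i h1 h2
    have hlen : (pvMp t u).length = u.length := by simp [pvMp]
    have hlen2 : (pvMs u).length = u.length := by simp [pvMs]
    have hi : i < u.length := by
      simp [pvStepA, pvMp] at h1; omega
    simp only [pvStepA, List.getElem_map, List.getElem_range]
    rw [List.getD_eq_getElem _ _ (by omega : i < (pvMp t u).length),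
        List.getD_eq_getElem _ _ (by omega : i < (pvMs u).length)]
    simp only [pvMp, pvMs, List.getElem_reverse, List.getElem_map, List.length_map]
    ring

theorem pvHead_dropWhile (p : α → Bool) (l : List α) :
    ∀ hd, (l.dropWhile p).head? = some hd → p hd = false := by
  induction l with
  | nil => intro hd h; simp at h
  | cons x l ih =>
    intro hd h
    rw [List.dropWhile_cons] at h
    by_cases hx : p x
    · rw [if_pos hx] at h; exact ih hd h
    · rw [if_neg hx] at h
      simp at h
      rw [← h]
      exact eq_false_of_ne_true hx

theorem pvFoldl_max_init (l : List Int) : ∀ a : Nat,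
    a ≤ l.foldl (fun m p => max m (100 - p).toNat) a := by
  induction l with
  | nil => intro a; simp
  | cons x l ih =>
    intro a
    exact le_trans (le_max_left _ _) (ih _)

theorem pvFoldl_max_mem (l : List Int) : ∀ (a : Nat), ∀ p ∈ l,
    (100 - p).toNat ≤ l.foldl (fun m q => max m (100 - q).toNat) a := by
  induction l with
  | nil => intro a p hp; simp at hp
  | cons x l ih =>
    intro a p hp
    rcases List.mem_cons.mp hp with h | h
    · subst h
      exact le_trans (le_max_right _ _) (pvFoldl_max_init l _)
    · exact ih _ p h

theorem pvDay_le_bound (p s T : Int) (hs : 1 ≤ s) (hT1 : 1 ≤ T) (hTp : 100 - p ≤ T) :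
    pvDayB p s ≤ T := by
  rw [pvDay_le_iff p s T hs hT1]
  have h2 : T ≤ T * s := le_mul_of_one_le_right (by omega) hs
  linarith

theorem pvLoopA_spec : ∀ (fuel : Nat) (u : List (Int × Int)) (t : Int) (ans : List Int),
    (∀ x ∈ u, 1 ≤ x.2) → u ≠ [] → 0 ≤ t →
    (∀ x ∈ u, pvDayB x.1 x.2 ≤ t + fuel) →
    (∀ hd, u.head? = some hd → t < pvDayB hd.1 hd.2) →
    pvLoopA fuel (pvMp t u) (pvMs u) ans = ans ++ pvSpecGo (u.map (fun x => pvDayB x.1 x.2)) := by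
  intro fuel
  induction fuel with
  | zero =>
    intro u t ans hs hne ht hbound hhead
    obtain ⟨x, u', rfl⟩ := List.exists_cons_of_ne_nil hne
    have h1 := hbound x (by simp)
    have h2 := hhead x (by simp)
    omega
  | succ fuel ih =>
    intro u t ans hs hne ht hbound hhead
    obtain ⟨x, u'', rfl⟩ := List.exists_cons_of_ne_nil hne
    set u : List (Int × Int) := x :: u'' with hu
    show pvLoopA (fuel + 1) (pvMp t u) (pvMs u) ans = _
    rw [pvLoopA, pvStepA_spec, pvPopA_spec u (t + 1) (by omega) hs 0]
    have hxs : 1 ≤ x.2 := hs x (by simp [hu])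
    have hxhd : t < pvDayB x.1 x.2 := hhead x (by simp [hu])
    by_cases hx : pvDayB x.1 x.2 ≤ t + 1
    · have hxeq : pvDayB x.1 x.2 = t + 1 := by omega
      by_cases hdw : u.dropWhile (fun y => decide (pvDayB y.1 y.2 ≤ t + 1)) = []
      · rw [if_pos ⟨hdw, by simp [hu]⟩]
        simp only []
        have hall : ∀ y ∈ u, pvDayB y.1 y.2 ≤ t + 1 := by
          intro y hy
          have := (List.dropWhile_eq_nil_iff).mp hdw y hy
          simpa using this
        have htw : u.takeWhile (fun y => decide (pvDayB y.1 y.2 ≤ t + 1)) = u := by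
          rw [List.takeWhile_eq_self_iff]
          intro y hy; simpa using hall y hy
        rw [htw]
        -- RHS: one group of size u.length
        have hall'' : ∀ e ∈ u''.map (fun y => pvDayB y.1 y.2), e ≤ pvDayB x.1 x.2 := by
          intro e he
          obtain ⟨y, hy, rfl⟩ := List.mem_map.mp he
          rw [hxeq]; exact hall y (by simp [hu, hy])
        have htw2 : (u''.map (fun y => pvDayB y.1 y.2)).takeWhile
            (fun e => decide (e ≤ pvDayB x.1 x.2)) = u''.map (fun y => pvDayB y.1 y.2) := by
          rw [List.takeWhile_eq_self_iff]
          intro e he; simpa using hall'' e he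
        have hdw2 : (u''.map (fun y => pvDayB y.1 y.2)).dropWhile
            (fun e => decide (e ≤ pvDayB x.1 x.2)) = [] := by
          rw [List.dropWhile_eq_nil_iff]
          intro e he; simpa using hall'' e he
        simp only [hu, List.map_cons]
        rw [pvSpecGo, htw2, hdw2, pvSpecGo]
        simp
        ring_nf
      · rw [if_neg (by simp [hdw])]
        set pd : Int × Int → Bool := fun y => decide (pvDayB y.1 y.2 ≤ t + 1) with hpd
        set u2 := u.dropWhile pd with hu2
        have hpdx : pd x = true := by simp [hpd, hx]
        have htwlen : (u.takeWhile pd).length = 1 + (u''.takeWhile pd).length := by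
          simp [hu, hpdx]
          omega
        have hcnt : ((u.takeWhile pd).length : Int) ≠ 0 := by
          rw [htwlen]; push_cast; omega
        simp only []
        rw [if_pos (by simpa using hcnt)]
        have hrec := ih u2 (t + 1) (ans ++ [(0:Int) + ((u.takeWhile pd).length : Int)])
          (fun y hy => hs y ((List.dropWhile_sublist pd (l := u)).mem hy))
          hdw (by omega)
          (fun y hy => by
            have := hbound y ((List.dropWhile_sublist pd (l := u)).mem hy)
            push_cast at this ⊢; omega)
          (fun hd hhd => by
            have := pvHead_dropWhile pd u hd hhd
            simp [hpd] at this; omega)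
        rw [hrec]
        -- pvSpecGo (map day u) = cnt :: pvSpecGo (map day u2)
        have hcomp : ((fun e => decide (e ≤ pvDayB x.1 x.2)) ∘ (fun y : Int × Int => pvDayB y.1 y.2)) = pd := by
          funext y; simp [hpd, hxeq]
        have htwm : (u''.map (fun y => pvDayB y.1 y.2)).takeWhile (fun e => decide (e ≤ pvDayB x.1 x.2))
            = (u''.takeWhile pd).map (fun y => pvDayB y.1 y.2) := by
          rw [List.takeWhile_map, hcomp]
        have hdwm : (u''.map (fun y => pvDayB y.1 y.2)).dropWhile (fun e => decide (e ≤ pvDayB x.1 x.2))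
            = (u''.dropWhile pd).map (fun y => pvDayB y.1 y.2) := by
          rw [List.dropWhile_map, hcomp]
        have hu2eq : u2 = u''.dropWhile pd := by
          simp [hu2, hu, hpdx]
        conv_rhs => rw [hu, List.map_cons, pvSpecGo]
        rw [htwm, hdwm, ← hu2eq, htwlen]
        simp only [List.length_map]
        rw [List.append_assoc]
        simp only [List.singleton_append]
        congr 2
        push_cast
        ring
    · -- head not yet ready: cnt = 0, state unchanged, one more day passes
      have hpdx : (fun y : Int × Int => decide (pvDayB y.1 y.2 ≤ t + 1)) x = false := by
        simp [hx]
      have hdwu : u.dropWhile (fun y => decide (pvDayB y.1 y.2 ≤ t + 1)) = u := by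
        simp [hu, hpdx]
      have htwu : u.takeWhile (fun y => decide (pvDayB y.1 y.2 ≤ t + 1)) = [] := by
        simp [hu, hpdx]
      rw [if_neg (by rw [hdwu]; simp [hu])]
      rw [hdwu, htwu]
      simp only [List.length_nil, Nat.cast_zero, add_zero, ne_eq, not_true_eq_false]
      exact ih u (t + 1) ans hs (by simp [hu]) (by omega)
        (fun y hy => by have := hbound y hy; push_cast at this ⊢; omega)
        (fun hd hhd => by simp [hu] at hhd; subst hhd; omega)

theorem pvBfold : ∀ (dys ans : List Int) (cur cnt : Int), 1 ≤ cnt →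
    (let st := dys.foldl pvStepB (ans, cur, cnt);
     if st.2.2 ≠ 0 then st.1 ++ [st.2.2] else st.1)
    = ans ++ (cnt + ((dys.takeWhile (fun e => decide (e ≤ cur))).length : Int)) ::
        pvSpecGo (dys.dropWhile (fun e => decide (e ≤ cur))) := by
  intro dys
  induction dys with
  | nil =>
    intro ans cur cnt hcnt
    simp [pvSpecGo]
    omega
  | cons d rest ih =>
    intro ans cur cnt hcnt
    by_cases hd : d ≤ cur
    · have hstep : pvStepB (ans, cur, cnt) d = (ans, cur, cnt + 1) := by
        simp [pvStepB, hd]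
      simp only [List.foldl_cons, hstep]
      rw [ih ans cur (cnt + 1) (by omega)]
      simp [hd]
      ring_nf
    · have hstep : pvStepB (ans, cur, cnt) d = (ans ++ [cnt], d, 1) := by
        simp [pvStepB, hd]
        omega
      simp only [List.foldl_cons, hstep]
      rw [ih (ans ++ [cnt]) d 1 (by omega)]
      have htw : (d :: rest).takeWhile (fun e => decide (e ≤ cur)) = [] := by
        simp [hd]
      have hdw : (d :: rest).dropWhile (fun e => decide (e ≤ cur)) = d :: rest := by
        simp [hd]
      rw [htw, hdw, pvSpecGo]
      simp

theorem pvDaysEq (prog spd : List Int) (hlen : prog.length = spd.length) :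
    (List.range prog.length).map (fun i => pvDayB (prog.getD i 0) (spd.getD i 0))
      = (prog.zip spd).map (fun x => pvDayB x.1 x.2) := by
  apply List.ext_getElem
  · simp [List.length_zip, hlen]
  · intro i h1 h2
    simp only [List.getElem_map, List.getElem_range]
    have hi : i < prog.length := by simpa using h1
    rw [List.getD_eq_getElem _ _ hi, List.getD_eq_getElem _ _ (by omega)]
    rw [List.getElem_zip]

theorem pvAlt_spec (prog spd : List Int) (hne : prog ≠ [])
    (hlen : prog.length = spd.length) :
    solution_alt prog spd = pvSpecGo ((prog.zip spd).map (fun x => pvDayB x.1 x.2)) := by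
  have hfold : ∀ init : List Int × Int × Int,
      (List.range prog.length).foldl
        (fun acc i => pvStepB acc (pvDayB (prog.getD i 0) (spd.getD i 0))) init
        = ((prog.zip spd).map (fun x => pvDayB x.1 x.2)).foldl pvStepB init := by
    intro init
    rw [← pvDaysEq prog spd hlen, List.foldl_map]
  have hzne : prog.zip spd ≠ [] := by
    intro h
    have := congrArg List.length h
    rw [List.length_zip] at this
    simp only [List.length_nil] at this
    exact hne (List.length_eq_zero_iff.mp (by omega))
  obtain ⟨x, u, hu⟩ := List.exists_cons_of_ne_nil hzne
  unfold solution_alt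
  rw [hfold ([], 0, 0), hu]
  simp only [List.map_cons, List.foldl_cons]
  have hd1 : 1 ≤ pvDayB x.1 x.2 := pvDay_pos x.1 x.2
  have hstep : pvStepB ([], 0, 0) (pvDayB x.1 x.2) = ([], pvDayB x.1 x.2, 1) := by
    simp [pvStepB]
    omega
  rw [hstep]
  have := pvBfold (u.map (fun x => pvDayB x.1 x.2)) [] (pvDayB x.1 x.2) 1 (by omega)
  simp only at this
  rw [this, pvSpecGo]
  simp

-- ===== VERDICT (by name: the statement is the Claim_ definition above) =====
theorem solution_spec : Claim_equal_solution := by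
  intro prog spd _hdom hpre
  obtain ⟨hne, hlen, hs⟩ := hpre
  unfold Spec_solution
  set u := prog.zip spd with hu
  have hsu : ∀ x ∈ u, 1 ≤ x.2 := by
    intro x hx
    exact hs x.2 (List.of_mem_zip hx).2
  have hune : u ≠ [] := by
    intro h
    have := congrArg List.length h
    rw [hu, List.length_zip] at this
    simp only [List.length_nil] at this
    exact hne (List.length_eq_zero_iff.mp (by omega))
  have hmp0 : prog.reverse = pvMp 0 u := by
    unfold pvMp
    congr 1
    have : (fun x : Int × Int => x.1 + 0 * x.2) = Prod.fst := by
      funext x; simp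
    rw [this, hu, List.map_fst_zip (by omega)]
  have hms0 : spd.reverse = pvMs u := by
    unfold pvMs
    congr 1
    rw [hu, List.map_snd_zip (by omega)]
  set F := prog.foldl (fun m p => max m (100 - p).toNat) 1 with hF
  have hF1 : 1 ≤ F := pvFoldl_max_init prog 1
  have hbound : ∀ x ∈ u, pvDayB x.1 x.2 ≤ 0 + (F : Int) := by
    intro x hx
    have hx1 : x.1 ∈ prog := (List.of_mem_zip hx).1
    have h1 : (100 - x.1).toNat ≤ F := pvFoldl_max_mem prog 1 x.1 hx1
    refine le_trans (pvDay_le_bound x.1 x.2 (F : Int) (hsu x hx) (by exact_mod_cast hF1) ?_) (by omega)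
    have := Int.self_le_toNat (100 - x.1)
    omega
  have hhead : ∀ hd, u.head? = some hd → (0:Int) < pvDayB hd.1 hd.2 := by
    intro hd _
    have := pvDay_pos hd.1 hd.2
    omega
  unfold solution
  rw [hmp0, hms0, ← hF]
  rw [pvLoopA_spec F u 0 [] hsu hune (by omega) hbound hhead]
  rw [pvAlt_spec prog spd hne hlen]
  simp [hu]
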